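-- pv_equiv track=rewrite | github.com/niyabraham/SafeLand | scripts/enrich_with_indian_sources.py | compute_ksdma_zones
-- ===== SOURCE A (Python) =====
-- def compute_ksdma_zones(elevations):
--     def zone(e):
--         if   e < 10:  return 5
--         elif e < 30:  return 4
--         elif e < 60:  return 3
--         elif e < 100: return 2
--         else:         return 1
--     return [zone(e) for e in elevations]
-- ===== SOURCE B (Python) =====
-- def compute_ksdma_zones(elevations):
--     bounds = [10, 30, 60, 100]
--     order = sorted(range(len(elevations)), key=lambda i: elevations[i])
--     zones = [0] * len(elevations)
--     j = 0
--     for i in order: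
--         while j < len(bounds) and bounds[j] <= elevations[i]:
--             j += 1
--         zones[i] = 5 - j
--     return zones
-- ===== Notes on version B (the rewrite author's own statement) =====
-- stated objective: alternative
-- what changed: Replaces the per-element if-cascade with a sort-and-sweep: indices are sorted by elevation, a single pointer over the four thresholds advances monotonically across the whole sorted pass, and zones are scattered back into place by index.
import Mathlib
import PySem

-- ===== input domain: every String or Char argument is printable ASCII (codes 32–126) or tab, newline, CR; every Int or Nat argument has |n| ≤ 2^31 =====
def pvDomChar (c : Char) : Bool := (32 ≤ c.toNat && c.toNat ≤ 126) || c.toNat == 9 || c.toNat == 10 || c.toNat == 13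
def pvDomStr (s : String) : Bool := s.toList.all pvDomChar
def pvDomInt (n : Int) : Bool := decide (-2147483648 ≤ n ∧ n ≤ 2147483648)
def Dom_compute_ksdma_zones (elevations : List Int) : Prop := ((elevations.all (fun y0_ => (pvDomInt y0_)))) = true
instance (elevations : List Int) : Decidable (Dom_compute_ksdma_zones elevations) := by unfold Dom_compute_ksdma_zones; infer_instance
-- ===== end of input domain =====

-- B replaces the if-cascade with a sort-and-sweep: indices sorted by elevation, one
-- threshold pointer advancing monotonically, zones scattered back by index (alternative algorithm).

-- ===== PORT A =====
def pvZoneA (e : Int) : Int :=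
  if e < 10 then 5
  else if e < 30 then 4
  else if e < 60 then 3
  else if e < 100 then 2
  else 1

def compute_ksdma_zones (elevations : List Int) : List Int :=
  elevations.map (fun e => pvZoneA e)

-- ===== PORT B =====
def pvBounds : List Int := [10, 30, 60, 100]

-- the inner 'while j < len(bounds) and bounds[j] <= e: j += 1'
def pvSweep (bounds : List Int) (e : Int) (j : Nat) : Nat :=
  if j < bounds.length then
    if PySem.List.pyGetD bounds (j : Int) 0 ≤ e then pvSweep bounds e (j + 1) else j
  else j
termination_by bounds.length - j

-- one iteration of 'for i in order'
def pvStep (elevations : List Int) (st : List Int × Nat) (i : Int) : List Int × Nat :=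
  let j' := pvSweep pvBounds (PySem.List.pyGetD elevations i 0) st.2
  (PySem.List.pySetD st.1 i (5 - (j' : Int)), j')

def compute_ksdma_zones_alt (elevations : List Int) : List Int :=
  let order := PySem.List.sorted (PySem.List.pyRange 0 elevations.length 1)
      (fun i => PySem.List.pyGetD elevations i 0) false
  (order.foldl (pvStep elevations) (List.replicate elevations.length 0, 0)).1

-- ===== PRECONDITION & SPEC =====
def Spec_compute_ksdma_zones (elevations : List Int) (out : List Int) : Prop := out = compute_ksdma_zones_alt elevations
instance (elevations : List Int) (out : List Int) : Decidable (Spec_compute_ksdma_zones elevations out) := by unfold Spec_compute_ksdma_zones; infer_instance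

-- ===== CLAIM (what is proved, stated in full; the proofs are below) =====
def Claim_equal_compute_ksdma_zones : Prop := ∀ (elevations : List Int), Dom_compute_ksdma_zones elevations → Spec_compute_ksdma_zones elevations (compute_ksdma_zones elevations)

-- ===== LEMMAS AND PROOFS =====

-- number of thresholds ≤ e
def pvCnt (e : Int) : Nat :=
  (if 10 ≤ e then 1 else 0) + (if 30 ≤ e then 1 else 0) + (if 60 ≤ e then 1 else 0) + (if 100 ≤ e then 1 else 0)

theorem pvCnt_le_four (e : Int) : pvCnt e ≤ 4 := by
  unfold pvCnt; split_ifs <;> omega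

theorem pvCnt_mono {a b : Int} (h : a ≤ b) : pvCnt a ≤ pvCnt b := by
  unfold pvCnt; split_ifs <;> omega

theorem pvSweep_correct (e : Int) (j : Nat) (hj : j ≤ pvCnt e) :
    pvSweep pvBounds e j = pvCnt e := by
  have h4 := pvCnt_le_four e
  unfold pvCnt at *
  split_ifs at * <;>
    (interval_cases j <;> simp_all [pvSweep, pvBounds, PySem.List.pyGetD] <;> omega)

theorem pvZoneA_eq (e : Int) : pvZoneA e = 5 - (pvCnt e : Int) := by
  unfold pvZoneA pvCnt; split_ifs <;> simp_all <;> omega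

-- with the pointer below every remaining count, the fold scatters the exact counts
theorem pvFold_spec (elevations : List Int) (order : List Int) (zs : List Int) (j : Nat)
    (hmono : order.Pairwise (fun a b => PySem.List.pyGetD elevations a 0 ≤ PySem.List.pyGetD elevations b 0))
    (hj : ∀ i ∈ order, j ≤ pvCnt (PySem.List.pyGetD elevations i 0)) :
    (order.foldl (pvStep elevations) (zs, j)).1 =
      order.foldl (fun z i => PySem.List.pySetD z i (5 - (pvCnt (PySem.List.pyGetD elevations i 0) : Int))) zs := by
  induction order generalizing zs j with
  | nil => rfl
  | cons i t ih =>
      rw [List.pairwise_cons] at hmono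
      have hsw : pvSweep pvBounds (PySem.List.pyGetD elevations i 0) j
          = pvCnt (PySem.List.pyGetD elevations i 0) :=
        pvSweep_correct _ _ (hj i (List.mem_cons_self ..))
      simp only [List.foldl_cons, pvStep, hsw]
      exact ih _ _ hmono.2 (fun i' hi' => pvCnt_mono (hmono.1 i' hi'))

theorem pvScatter_length (f : Int → Int) (order : List Int) (zs : List Int) :
    (order.foldl (fun z i => PySem.List.pySetD z i (f i)) zs).length = zs.length := by
  induction order generalizing zs with
  | nil => rfl
  | cons i t ih => rw [List.foldl_cons, ih, PySem.List.length_pySetD]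

-- getElem? after a nodup in-range scatter
theorem pvScatter_get (f : Int → Int) (order : List Int) (zs : List Int) (hn : order.Nodup)
    (hr : ∀ i ∈ order, 0 ≤ i ∧ i < (zs.length : Int)) (k : Nat) :
    (order.foldl (fun z i => PySem.List.pySetD z i (f i)) zs)[k]? =
      if (k : Int) ∈ order then some (f k) else zs[k]? := by
  induction order generalizing zs with
  | nil => simp
  | cons i t ih =>
      simp only [List.foldl_cons, List.nodup_cons] at *
      obtain ⟨h0, hlt⟩ := hr i (List.mem_cons_self ..)
      have hset : PySem.List.pySetD zs i (f i) = zs.set i.toNat (f i) :=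
        PySem.List.pySetD_of_nonneg _ _ h0
      have hlen : (zs.set i.toNat (f i)).length = zs.length := by simp
      rw [hset, ih (zs.set i.toNat (f i)) hn.2
        (fun i' hi' => by rw [hlen]; exact hr i' (List.mem_cons_of_mem _ hi'))]
      by_cases hk : (k : Int) ∈ t
      · simp [hk]
      · by_cases hik : (k : Int) = i
        · have hik' : i.toNat = k := by omega
          rw [if_neg hk, if_pos (by rw [hik]; exact List.mem_cons_self ..), ← hik',
              List.getElem?_set_self (by omega), Int.toNat_of_nonneg h0]
        · have hne : i.toNat ≠ k := by omega
          simp [hk, hik, List.getElem?_set_ne hne]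

theorem compute_ksdma_zones_spec : Claim_equal_compute_ksdma_zones := by
  intro elevations _
  unfold Spec_compute_ksdma_zones compute_ksdma_zones compute_ksdma_zones_alt
  set n := elevations.length with hn
  set key : Int → Int := fun i => PySem.List.pyGetD elevations i 0 with hkey
  set order := PySem.List.sorted (PySem.List.pyRange 0 (n : Int) 1) key false with horder
  have hperm : order.Perm (PySem.List.pyRange 0 (n : Int) 1) := PySem.List.sorted_perm _ _ _
  have hmem : ∀ i ∈ order, 0 ≤ i ∧ i < (n : Int) := by
    intro i hi
    have := hperm.mem_iff.mp hi
    have := (PySem.List.mem_pyRange_one).mp this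
    omega
  have hnodup : order.Nodup := hperm.nodup_iff.mpr (PySem.List.nodup_pyRange_one 0 (n : Int))
  have hpw : order.Pairwise (fun a b => key a ≤ key b) := PySem.List.sorted_pairwise _ _
  rw [pvFold_spec elevations order _ 0 hpw (fun _ _ => Nat.zero_le _)]
  apply List.ext_getElem?
  intro k
  by_cases hk : k < n
  · rw [pvScatter_get (fun i => 5 - (pvCnt (key i) : Int)) order _ hnodup
      (by simpa using hmem) k]
    have hkin : (k : Int) ∈ order := by
      rw [hperm.mem_iff, PySem.List.mem_pyRange_one]; omega
    rw [if_pos hkin]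
    rw [List.getElem?_map, List.getElem?_eq_getElem hk]
    simp only [Option.map_some]
    congr 1
    rw [pvZoneA_eq]
    congr 2
    simp [hkey, PySem.List.pyGetD_natCast, List.getElem?_eq_getElem hk]
  · have h1 : n ≤ k := Nat.le_of_not_lt hk
    have hlen : (order.foldl (fun z i => PySem.List.pySetD z i
        (5 - (pvCnt (key i) : Int))) (List.replicate n 0)).length = n := by
      rw [pvScatter_length]; simp
    rw [List.getElem?_eq_none (by simpa using h1),
        List.getElem?_eq_none (by rw [hlen]; exact h1)]
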